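-- pv_equiv track=rewrite | github.com/love-adela/algorithm-ps | programmers/skill-test-lv2/solution-1.py | solution
-- ===== SOURCE A (Python) =====
-- def solution(string:str)->int:
--     stack = []
--     for c in string:
--         if stack and stack[-1] == c:
--             stack.pop()
--         else:
--             stack.append(c)
--     return 1 if len(stack) == 0 else 0
-- ===== SOURCE B (Python) =====
-- def _reduce(s: str) -> str:
--     # irreducible form of s under removal of adjacent equal pairs
--     if len(s) <= 1:
--         return s
--     mid = len(s) // 2
--     left = _reduce(s[:mid])
--     right = _reduce(s[mid:])
--     i, j = len(left) - 1, 0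
--     while i >= 0 and j < len(right) and left[i] == right[j]:
--         i -= 1
--         j += 1
--     return left[:i + 1] + right[j:]
--
-- def solution(string: str) -> int:
--     return 1 if len(_reduce(string)) == 0 else 0
-- ===== Notes on version B (the rewrite author's own statement) =====
-- stated objective: alternative
-- what changed: Replaces the single left-to-right stack pass with a divide-and-conquer reduction: recursively reduce each half to its irreducible form and cancel equal characters across the boundary with a two-pointer walk, then test emptiness (correct by confluence of adjacent-equal-pair removal).
import Mathlib
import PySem

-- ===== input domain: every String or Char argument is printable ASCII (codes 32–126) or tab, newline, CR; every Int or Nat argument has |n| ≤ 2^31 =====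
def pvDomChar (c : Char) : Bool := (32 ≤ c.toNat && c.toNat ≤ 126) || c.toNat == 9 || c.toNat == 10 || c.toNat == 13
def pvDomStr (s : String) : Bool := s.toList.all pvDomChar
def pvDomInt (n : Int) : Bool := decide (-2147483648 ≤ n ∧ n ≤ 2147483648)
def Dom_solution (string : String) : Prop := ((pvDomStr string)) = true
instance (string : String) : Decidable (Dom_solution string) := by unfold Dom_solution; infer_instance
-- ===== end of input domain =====

-- B is an alternative algorithm with the same return value: divide-and-conquer reduction with boundary cancellation instead of a single stack pass; equivalence rests on confluence of adjacent-equal-pair removal.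

-- ===== PORT A =====
-- loop body of A's for-loop: pop the top on a match, push otherwise
def pvStep (stack : List Char) (c : Char) : List Char :=
  match stack with
  | [] => [c]
  | t :: ts => if t = c then ts else c :: t :: ts

def solution (string : String) : Int :=
  let stack := string.toList.foldl pvStep []
  if stack.length = 0 then 1 else 0

-- ===== PORT B =====
-- B's while-loop: cancel equal characters across the boundary, walking left from the
-- end of `left` and right from the start of `right`; `lr` is left reversed, so the
-- two-pointer walk is the simultaneous peeling of both lists
def pvCancel (lr r : List Char) : List Char :=
  match lr, r with
  | x :: lr', y :: r' => if x = y then pvCancel lr' r' else (x :: lr').reverse ++ (y :: r')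
  | lr, r => lr.reverse ++ r

-- B's _reduce: split in half, reduce both halves, cancel across the boundary
def pvReduce (s : List Char) : List Char :=
  match s with
  | [] => []
  | [a] => [a]
  | a :: b :: t =>
    let s := a :: b :: t
    let mid := s.length / 2
    let left := pvReduce (s.take mid)
    let right := pvReduce (s.drop mid)
    pvCancel left.reverse right
termination_by s.length
decreasing_by
  · simp only [List.length_take, List.length_cons]; omega
  · simp only [List.length_drop, List.length_cons]; omega

def solution_alt (string : String) : Int :=
  if (pvReduce string.toList).length = 0 then 1 else 0

-- ===== PRECONDITION & SPEC =====
def Spec_solution (string : String) (out : Int) : Prop := out = solution_alt string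
instance (string : String) (out : Int) : Decidable (Spec_solution string out) := by unfold Spec_solution; infer_instance

-- ===== CLAIM (what is proved, stated in full; the proofs are below) =====
def Claim_equal_solution : Prop := ∀ (string : String), Dom_solution string → Spec_solution string (solution string)

-- ===== LEMMAS AND PROOFS =====

-- A's stack never holds two equal adjacent characters
theorem pvStep_noAdj {st : List Char} (c : Char) (h : List.IsChain Ne st) :
    List.IsChain Ne (pvStep st c) := by
  cases st with
  | nil => exact List.isChain_singleton c
  | cons t ts =>
    unfold pvStep
    by_cases htc : t = c
    · simpa [htc] using h.tail
    · simp only [htc, if_false]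
      exact List.isChain_cons_cons.mpr ⟨fun hct => htc hct.symm, h⟩

theorem foldl_pvStep_noAdj {st : List Char} (l : List Char) (h : List.IsChain Ne st) :
    List.IsChain Ne (l.foldl pvStep st) := by
  induction l generalizing st with
  | nil => exact h
  | cons a t ih => exact ih (pvStep_noAdj a h)

-- on a duplicate-free stack, processing the same character twice is a no-op
theorem pvStep_step {st : List Char} (a : Char) (h : List.IsChain Ne st) :
    pvStep (pvStep st a) a = st := by
  cases st with
  | nil => simp [pvStep]
  | cons t ts =>
    by_cases hta : t = a
    · subst hta
      cases ts with
      | nil => simp [pvStep]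
      | cons u us =>
        have htu : t ≠ u := (List.isChain_cons_cons.mp h).1
        simp [pvStep, Ne.symm htu]
    · simp [pvStep, hta]

-- removing an adjacent equal pair anywhere does not change the stack result
theorem foldl_cancel_mid {st : List Char} (xs : List Char) (c : Char) (ys : List Char)
    (h : List.IsChain Ne st) :
    (xs ++ c :: c :: ys).foldl pvStep st = (xs ++ ys).foldl pvStep st := by
  rw [List.foldl_append, List.foldl_append]
  simp only [List.foldl]
  rw [pvStep_step c (foldl_pvStep_noAdj xs h)]

-- the boundary cancellation is a sequence of adjacent-pair removals
theorem pvCancel_foldl {st : List Char} (lr r : List Char) (h : List.IsChain Ne st) :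
    (lr.reverse ++ r).foldl pvStep st = (pvCancel lr r).foldl pvStep st := by
  induction lr generalizing r with
  | nil => simp [pvCancel]
  | cons x lr' ih =>
    cases r with
    | nil => simp [pvCancel]
    | cons y r' =>
      unfold pvCancel
      by_cases hxy : x = y
      · subst hxy
        simp only [if_pos]
        have hsplit : (x :: lr').reverse ++ x :: r' = lr'.reverse ++ x :: x :: r' := by
          simp
        rw [hsplit, foldl_cancel_mid lr'.reverse x r' h]
        exact ih r'
      · simp [hxy]

-- the boundary cancellation of two irreducible halves is irreducible
theorem pvCancel_noAdj {lr r : List Char} (hl : List.IsChain Ne lr.reverse)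
    (hr : List.IsChain Ne r) : List.IsChain Ne (pvCancel lr r) := by
  induction lr generalizing r with
  | nil => simpa [pvCancel] using hr
  | cons x lr' ih =>
    cases r with
    | nil => simpa [pvCancel] using hl
    | cons y r' =>
      unfold pvCancel
      by_cases hxy : x = y
      · simp only [if_pos hxy]
        have hl' : List.IsChain Ne lr'.reverse := by
          rw [List.reverse_cons, List.isChain_append] at hl
          exact hl.1
        exact ih hl' hr.tail
      · simp only [if_neg hxy]
        rw [List.isChain_append]
        refine ⟨hl, hr, ?_⟩
        intro u hu v hv
        rw [List.reverse_cons, List.getLast?_concat] at hu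
        simp at hu hv
        subst hu; subst hv
        exact hxy

-- pvReduce yields an irreducible list with the same stack result as its input
theorem pvReduce_spec_aux (n : Nat) (s : List Char) (hn : s.length ≤ n) :
    List.IsChain Ne (pvReduce s) ∧
      ∀ st : List Char, List.IsChain Ne st →
        s.foldl pvStep st = (pvReduce s).foldl pvStep st := by
  induction n generalizing s with
  | zero =>
    have : s = [] := List.eq_nil_of_length_eq_zero (Nat.le_zero.mp hn)
    subst this
    exact ⟨by rw [pvReduce]; exact List.IsChain.nil, fun st _ => by rw [pvReduce]⟩
  | succ n ih =>
    match s with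
    | [] => exact ⟨by rw [pvReduce]; exact List.IsChain.nil, fun st _ => by rw [pvReduce]⟩
    | [a] => exact ⟨by rw [pvReduce]; exact List.isChain_singleton a, fun st _ => by rw [pvReduce]⟩
    | a :: b :: t =>
      rw [pvReduce]
      set s := a :: b :: t with hs
      set mid := s.length / 2 with hmid
      have htake : (s.take mid).length ≤ n := by
        simp only [List.length_take, hs, List.length_cons] at *
        omega
      have hdrop : (s.drop mid).length ≤ n := by
        simp only [List.length_drop, hs, List.length_cons] at *
        omega
      obtain ⟨hL, hLf⟩ := ih (s.take mid) htake
      obtain ⟨hR, hRf⟩ := ih (s.drop mid) hdrop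
      constructor
      · exact pvCancel_noAdj (by simpa using hL) hR
      · intro st hst
        have h1 : s.foldl pvStep st
            = ((pvReduce (s.take mid)) ++ (pvReduce (s.drop mid))).foldl pvStep st := by
          conv_lhs => rw [← List.take_append_drop mid s]
          rw [List.foldl_append, List.foldl_append, hLf st hst,
            hRf _ (foldl_pvStep_noAdj _ hst)]
        rw [h1]
        have h2 := pvCancel_foldl (lr := (pvReduce (s.take mid)).reverse)
          (r := pvReduce (s.drop mid)) hst
        simpa using h2

-- side condition: the top of the stack differs from the next input character
def pvHeadOk (st m : List Char) : Prop :=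
  match st, m with
  | s :: _, a :: _ => s ≠ a
  | _, _ => True

-- a duplicate-free input is pushed verbatim onto the stack
theorem foldl_noAdj_eq {m st : List Char} (hm : List.IsChain Ne m) (hst : List.IsChain Ne st)
    (hh : pvHeadOk st m) : m.foldl pvStep st = m.reverse ++ st := by
  induction m generalizing st with
  | nil => simp
  | cons a rest ih =>
    have hpush : pvStep st a = a :: st := by
      cases st with
      | nil => rfl
      | cons s ss =>
        have : s ≠ a := hh
        simp [pvStep, this]
    have hst' : List.IsChain Ne (a :: st) := by
      cases st with
      | nil => exact List.isChain_singleton a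
      | cons s ss =>
        have hsa : s ≠ a := hh
        exact List.isChain_cons_cons.mpr ⟨fun has => hsa has.symm, hst⟩
    have hh' : pvHeadOk (a :: st) rest := by
      cases rest with
      | nil => trivial
      | cons b t => exact (List.isChain_cons_cons.mp hm).1
    simp only [List.foldl, hpush]
    rw [ih hm.tail hst' hh']
    simp

-- ===== VERDICT (by name: the statement is the Claim_ definition above) =====
theorem solution_spec : Claim_equal_solution := by
  intro string _
  unfold Spec_solution solution solution_alt
  obtain ⟨hirr, hf⟩ := pvReduce_spec_aux string.toList.length string.toList le_rfl
  have h1 : string.toList.foldl pvStep [] = (pvReduce string.toList).reverse := by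
    rw [hf [] List.IsChain.nil]
    rw [foldl_noAdj_eq hirr List.IsChain.nil
        (by cases pvReduce string.toList <;> trivial)]
    simp
  simp only [h1, List.length_reverse]
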